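-- pv_equiv track=rewrite | github.com/okfn/ckanext-lacounts | ckanext/lacounts/helpers.py | get_resources_ordered
-- ===== SOURCE A (Python) =====
-- def get_resources_ordered(resources):
--     downloadable_resources = []
--     other_resources = []
--     for resource in (resources or []):
--         if resource.get('has_views') or resource.get('url_type') == 'upload':
--             downloadable_resources.append(resource)
--         else:
--             other_resources.append(resource)
--     return downloadable_resources + other_resources
-- ===== SOURCE B (Python) =====
-- def get_resources_ordered(resources):
--     return sorted(
--         resources or [],
--         key=lambda r: 0 if (r.get('has_views') or r.get('url_type') == 'upload') else 1,
--     )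
-- ===== Notes on version B (the rewrite author's own statement) =====
-- stated objective: idiomatic
-- what changed: Replaced the two-accumulator partition loop with a single stable sorted() call using a binary 0/1 key (0 = downloadable), relying on sort stability to preserve intra-group order.
import Mathlib
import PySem

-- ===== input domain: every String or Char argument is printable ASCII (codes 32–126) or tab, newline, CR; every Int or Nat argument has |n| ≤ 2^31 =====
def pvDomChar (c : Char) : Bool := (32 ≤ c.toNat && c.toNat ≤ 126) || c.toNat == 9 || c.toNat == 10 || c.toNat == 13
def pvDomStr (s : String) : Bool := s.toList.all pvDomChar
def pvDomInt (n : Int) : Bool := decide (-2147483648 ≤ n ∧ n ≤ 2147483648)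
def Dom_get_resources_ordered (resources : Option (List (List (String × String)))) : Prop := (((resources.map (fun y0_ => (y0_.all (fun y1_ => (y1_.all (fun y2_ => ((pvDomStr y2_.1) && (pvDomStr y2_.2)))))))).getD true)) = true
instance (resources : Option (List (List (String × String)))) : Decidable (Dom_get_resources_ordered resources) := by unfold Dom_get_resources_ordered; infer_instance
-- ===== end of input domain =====

-- B replaces A's two-list partition loop with one stable sorted() call on a binary 0/1 key (idiomatic; same return value).


-- ===== PORT A =====
-- truthiness of resource.get(k): None and '' are falsy, any other string truthy
def pvTruthy (v : Option String) : Bool :=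
  match v with
  | none => false
  | some s => !(s == "")

-- the shared branch condition: resource.get('has_views') or resource.get('url_type') == 'upload'
def pvDl (resource : List (String × String)) : Bool :=
  pvTruthy ((PySem.Dict.mk resource).get? "has_views") ||
    ((PySem.Dict.mk resource).get? "url_type" == some "upload")

def get_resources_ordered (resources : Option (List (List (String × String)))) : List (List (String × String)) :=
  let p := (resources.getD []).foldl
    (fun (acc : List (List (String × String)) × List (List (String × String))) resource =>
      if pvDl resource then (acc.1 ++ [resource], acc.2) else (acc.1, acc.2 ++ [resource]))
    ([], [])
  p.1 ++ p.2

-- ===== PORT B =====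
def pvKey (r : List (String × String)) : Int := if pvDl r then 0 else 1

def get_resources_ordered_alt (resources : Option (List (List (String × String)))) : List (List (String × String)) :=
  PySem.List.sorted (resources.getD []) pvKey

-- ===== PRECONDITION & SPEC =====
def Spec_get_resources_ordered (resources : Option (List (List (String × String)))) (out : List (List (String × String))) : Prop := out = get_resources_ordered_alt resources
instance (resources : Option (List (List (String × String)))) (out : List (List (String × String))) : Decidable (Spec_get_resources_ordered resources out) := by unfold Spec_get_resources_ordered; infer_instance

-- ===== CLAIM (what is proved, stated in full; the proofs are below) =====
def Claim_equal_get_resources_ordered : Prop := ∀ (resources : Option (List (List (String × String)))), Dom_get_resources_ordered resources → Spec_get_resources_ordered resources (get_resources_ordered resources)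

-- ===== LEMMAS AND PROOFS =====
theorem insertBy_nil {α : Type} (before : α → α → Bool) (x : α) :
    PySem.List.insertBy before x [] = [x] := rfl

theorem insertBy_cons {α : Type} (before : α → α → Bool) (x y : α) (ys : List α) :
    PySem.List.insertBy before x (y :: ys) =
      if before x y then x :: y :: ys else y :: PySem.List.insertBy before x ys := rfl

theorem insertBy_append_left {α : Type} (before : α → α → Bool) (x : α) (d o : List α)
    (hd : ∀ y ∈ d, before x y = false) :
    PySem.List.insertBy before x (d ++ o) = d ++ PySem.List.insertBy before x o := by
  induction d with
  | nil => simp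
  | cons y d ih =>
    have hy : before x y = false := hd y (by simp)
    simp [insertBy_cons, hy, ih (fun z hz => hd z (by simp [hz]))]

-- the partition loop of A equals the insertion-sort loop of B, given the loop invariant
theorem partition_eq_insert (rs d o : List (List (String × String)))
    (hd : ∀ r ∈ d, pvDl r = true) (ho : ∀ r ∈ o, pvDl r = false) :
    (rs.foldl
      (fun (acc : List (List (String × String)) × List (List (String × String))) resource =>
        if pvDl resource then (acc.1 ++ [resource], acc.2) else (acc.1, acc.2 ++ [resource]))
      (d, o)).1 ++
    (rs.foldl
      (fun (acc : List (List (String × String)) × List (List (String × String))) resource =>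
        if pvDl resource then (acc.1 ++ [resource], acc.2) else (acc.1, acc.2 ++ [resource]))
      (d, o)).2 =
    rs.foldl (fun acc x => PySem.List.insertBy (fun a b => decide (pvKey a < pvKey b)) x acc)
      (d ++ o) := by
  induction rs generalizing d o with
  | nil => simp
  | cons r rs ih =>
    by_cases hr : pvDl r = true
    · have hstep : PySem.List.insertBy (fun a b => decide (pvKey a < pvKey b)) r (d ++ o) =
          (d ++ [r]) ++ o := by
        rw [insertBy_append_left _ _ _ _ (by
          intro y hy; simp [pvKey, hr, hd y hy])]
        cases o with
        | nil => simp [insertBy_nil]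
        | cons z o' =>
          have hz := ho z (by simp)
          simp [insertBy_cons, pvKey, hr, hz]
      simp only [List.foldl_cons, hr, if_true, hstep]
      exact ih (d ++ [r]) o
        (by intro y hy; rcases List.mem_append.mp hy with h | h
            · exact hd y h
            · simp at h; simpa [h] using hr) ho
    · have hr' : pvDl r = false := by simpa using hr
      have hstep : PySem.List.insertBy (fun a b => decide (pvKey a < pvKey b)) r (d ++ o) =
          d ++ (o ++ [r]) := by
        rw [PySem.List.insertBy_of_forall_not_before]
        · simp
        · intro y hy
          by_cases hy2 : pvDl y = true <;> simp [pvKey, hr', hy2]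
      simp only [List.foldl_cons, hr', if_false, Bool.false_eq_true, hstep]
      exact ih d (o ++ [r]) hd
        (by intro y hy; rcases List.mem_append.mp hy with h | h
            · exact ho y h
            · simp at h; simpa [h] using hr')

-- ===== VERDICT (by name: the statement is the Claim_ definition above) =====
theorem get_resources_ordered_spec : Claim_equal_get_resources_ordered := by
  intro resources _
  unfold Spec_get_resources_ordered get_resources_ordered get_resources_ordered_alt
  rw [PySem.List.sorted_eq_foldl_insertBy]
  exact partition_eq_insert _ [] [] (by simp) (by simp)
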